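-- pv_equiv track=rewrite | github.com/atakml/INSIDE_SHAP | codebase/ExplanationEvaluation/PatternMining/Draw_plots.py | filter_si_less_ten
-- ===== SOURCE A (Python) =====
-- def filter_si_less_ten(layer_dict):
--     for (layer, target) in layer_dict.keys():
--         rules = []
--         for rule in layer_dict[(layer, target)]:
--             rules.append(rule)
--             if rule["score"] < 10:
--                 break
--         layer_dict[(layer, target)] = rules
--     return layer_dict
-- ===== SOURCE B (Python) =====
-- def filter_si_less_ten(layer_dict):
--     # Count the leading run of high-score rules, then slice one past it.
--     # Mutates layer_dict in place (like the original) and returns it.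
--     for key, rules in layer_dict.items():
--         i = 0
--         while i < len(rules) and rules[i]["score"] >= 10:
--             i += 1
--         layer_dict[key] = rules[: i + 1]
--     return layer_dict
-- ===== Notes on version B (the rewrite author's own statement) =====
-- stated objective: alternative
-- what changed: Replaces the append-until-break inner loop by counting the leading run of rules with score>=10 with an index-based while loop and slicing one element past it (rules[:i+1]), so no per-element list is accumulated.
import Mathlib
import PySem

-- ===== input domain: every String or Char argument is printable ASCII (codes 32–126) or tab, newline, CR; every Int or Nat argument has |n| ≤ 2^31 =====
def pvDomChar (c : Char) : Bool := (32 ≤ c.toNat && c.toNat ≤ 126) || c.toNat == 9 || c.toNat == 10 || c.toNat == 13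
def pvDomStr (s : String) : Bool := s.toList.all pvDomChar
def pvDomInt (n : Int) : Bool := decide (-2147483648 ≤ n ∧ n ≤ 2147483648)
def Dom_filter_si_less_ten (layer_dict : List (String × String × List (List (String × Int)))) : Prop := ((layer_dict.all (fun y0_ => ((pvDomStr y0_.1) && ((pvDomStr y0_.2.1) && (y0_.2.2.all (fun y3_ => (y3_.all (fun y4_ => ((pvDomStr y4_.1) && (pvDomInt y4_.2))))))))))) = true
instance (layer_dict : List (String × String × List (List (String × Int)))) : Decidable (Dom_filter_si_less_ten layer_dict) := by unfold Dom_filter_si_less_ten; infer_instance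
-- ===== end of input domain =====

-- B replaces the append-until-break inner loop by an index-based count of the
-- leading run of high-score rules followed by a single slice rules[:i+1], and
-- processes the keys by structural recursion instead of a map; same cost,
-- different decomposition. Both programs mutate the dict in place; the
-- equivalence proved here is about the returned value.


-- ===== PORT A =====
-- a rule is a dict as an association list; lookup = first match (type convention).
-- rule["score"] raises KeyError when absent; Pre_ excludes reaching such a rule,
-- so the default 0 is never consulted on admitted inputs (exact there).
def pvScore? (rule : List (String × Int)) : Option Int := rule.lookup "score"
-- inner loop of A: append each rule, break after the first with score < 10
def pvLoopA : List (List (String × Int)) → List (List (String × Int))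
  | [] => []
  | rule :: rest =>
    rule :: (if (pvScore? rule).getD 0 < 10 then [] else pvLoopA rest)

-- for each key, reassign its value to the truncated rule list (keys/order unchanged)
def filter_si_less_ten (layer_dict : List (String × String × List (List (String × Int)))) : List (String × String × List (List (String × Int))) :=
  layer_dict.map (fun kv => (kv.1, kv.2.1, pvLoopA kv.2.2))

-- ===== PORT B =====
-- i = length of the leading run of rules with score >= 10 (the while loop),
-- then the slice rules[:i+1]; recursion over the keys replaces the dict loop
def filter_si_less_ten_alt : List (String × String × List (List (String × Int))) → List (String × String × List (List (String × Int)))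
  | [] => []
  | (layer, target, rules) :: rest =>
    let i := (rules.takeWhile (fun r => decide (10 ≤ (r.lookup "score").getD 0))).length
    (layer, target, rules.take (i + 1)) :: filter_si_less_ten_alt rest

-- ===== PRECONDITION & SPEC =====
-- Pre_ excludes exactly the inputs on which Python A raises KeyError: a rule with
-- no "score" key is reached before (strictly: with no earlier) rule with score < 10.
def Pre_filter_si_less_ten (layer_dict : List (String × String × List (List (String × Int)))) : Prop :=
  (layer_dict.all (fun kv =>
    match kv.2.2.findIdx? (fun r => (pvScore? r).isNone) with
    | none => true
    | some j => (kv.2.2.take j).any (fun r => decide ((pvScore? r).getD 0 < 10)))) = true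
instance (layer_dict : List (String × String × List (List (String × Int)))) : Decidable (Pre_filter_si_less_ten layer_dict) := by unfold Pre_filter_si_less_ten; infer_instance

def pvWitness_filter_si_less_ten : (List (String × String × List (List (String × Int)))) :=
  [("layer0", "t1", [[("score", 12)], [("score", 5)], [("note", 1)]]),
   ("layer1", "t2", [[("score", 15)], [("score", 11)]])]

def Spec_filter_si_less_ten (layer_dict : List (String × String × List (List (String × Int)))) (out : List (String × String × List (List (String × Int)))) : Prop := out = filter_si_less_ten_alt layer_dict
instance (layer_dict : List (String × String × List (List (String × Int)))) (out : List (String × String × List (List (String × Int)))) : Decidable (Spec_filter_si_less_ten layer_dict out) := by unfold Spec_filter_si_less_ten; infer_instance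

-- ===== CLAIM (what is proved, stated in full; the proofs are below) =====
def Claim_equal_filter_si_less_ten : Prop := ∀ (layer_dict : List (String × String × List (List (String × Int)))), Dom_filter_si_less_ten layer_dict → Pre_filter_si_less_ten layer_dict → Spec_filter_si_less_ten layer_dict (filter_si_less_ten layer_dict)

-- ===== LEMMAS AND PROOFS =====
theorem pvWitness_ok : Dom_filter_si_less_ten pvWitness_filter_si_less_ten ∧ Pre_filter_si_less_ten pvWitness_filter_si_less_ten := by
  constructor <;> decide

-- A's append-until-break loop equals "take one past the leading high-score run"
theorem pvLoopA_eq_take (rules : List (List (String × Int))) :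
    pvLoopA rules =
      rules.take ((rules.takeWhile (fun r => decide (10 ≤ (r.lookup "score").getD 0))).length + 1) := by
  induction rules with
  | nil => simp [pvLoopA]
  | cons r rest ih =>
    unfold pvLoopA
    by_cases h : (pvScore? r).getD 0 < 10
    · have h' : ¬ (10 ≤ (r.lookup "score").getD 0) := by
        simpa [pvScore?] using Int.not_le.mpr h
      simp [h, h']
    · have h' : 10 ≤ (r.lookup "score").getD 0 := by
        simpa [pvScore?] using Int.not_lt.mp h
      simp [h, h', List.take_succ_cons, ih]

-- the two ports agree on every input (unconditionally)
theorem ports_eq (layer_dict : List (String × String × List (List (String × Int)))) :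
    filter_si_less_ten layer_dict = filter_si_less_ten_alt layer_dict := by
  induction layer_dict with
  | nil => rfl
  | cons kv rest ih =>
    obtain ⟨l, t, rules⟩ := kv
    simp only [filter_si_less_ten, List.map_cons, filter_si_less_ten_alt]
    rw [pvLoopA_eq_take]
    exact congrArg _ ih

-- ===== VERDICT (by name: the statement is the Claim_ definition above) =====
theorem filter_si_less_ten_spec : Claim_equal_filter_si_less_ten :=
  fun layer_dict _ _ => ports_eq layer_dict
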